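-- pv_equiv track=rewrite | github.com/jayl2sw/Algorithm | Programmers/kakao/2020/괄호 변환.py | check
-- ===== SOURCE A (Python) =====
-- def check(brackets):
--     idx = 0
--     temp = 0
--     while temp >= 0 and idx < len(brackets):
--         if brackets[idx] == '(':
--             temp += 1
--         else:
--             temp -= 1
--         idx += 1
--     if idx == len(brackets):
--         return True
--     else:
--         return False
-- ===== SOURCE B (Python) =====
-- def check(brackets):
--     prefix = []
--     total = 0
--     for c in brackets:
--         total += 1 if c == '(' else -1
--         prefix.append(total)
--     return min(prefix, default=0) >= 0
-- ===== Notes on version B (the rewrite author's own statement) =====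
-- stated objective: simpler
-- what changed: A's fused early-exit while loop returning idx==len is replaced by building the full prefix-balance table and then a single min(...) >= 0 reduction over it.
-- intended difference: On strings whose running balance first goes negative exactly at the last character (e.g. ')'), A returns True because its loop never re-tests the balance after consuming the final character; B returns False, the intended answer for a never-goes-negative check. — e.g. on check(")"): A returns true, B returns false
import Mathlib
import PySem

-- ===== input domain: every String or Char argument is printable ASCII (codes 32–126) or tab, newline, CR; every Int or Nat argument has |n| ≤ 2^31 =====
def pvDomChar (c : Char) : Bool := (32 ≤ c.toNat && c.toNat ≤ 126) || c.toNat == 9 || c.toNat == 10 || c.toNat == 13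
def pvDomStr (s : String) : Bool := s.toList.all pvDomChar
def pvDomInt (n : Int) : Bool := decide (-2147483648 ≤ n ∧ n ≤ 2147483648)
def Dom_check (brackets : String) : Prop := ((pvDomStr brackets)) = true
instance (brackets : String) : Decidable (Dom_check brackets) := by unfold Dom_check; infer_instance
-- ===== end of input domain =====

-- B builds the full prefix-balance table and reduces it with min (simpler
-- decomposition than A's fused early-exit scan); B differs intentionally on
-- the D_check corner described below.

-- ===== PORT A =====
-- A's while loop: running balance `temp`; it tests temp ≥ 0 BEFORE consuming
-- each character and returns True iff the whole string was consumed.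
def checkLoop (l : List Char) (temp : Int) : Bool :=
  match l with
  | [] => true          -- idx == len(brackets): return True
  | c :: rest =>
      if 0 ≤ temp then
        checkLoop rest (temp + (if c == '(' then 1 else -1))
      else false        -- loop exited with idx < len: return False

def check (brackets : String) : Bool := checkLoop brackets.toList 0

-- ===== PORT B =====
-- B: one loop appending each running balance to `prefix`, then min(prefix, default=0) >= 0.
def check_alt (brackets : String) : Bool :=
  let pref := (brackets.toList.foldl
    (fun (st : List Int × Int) c =>
      (st.1 ++ [st.2 + (if c == '(' then (1 : Int) else -1)],
        st.2 + (if c == '(' then (1 : Int) else -1))) ([], 0)).1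
  decide (0 ≤ ((PySem.List.min? pref (fun x => x)).getD 0))

-- ===== PRECONDITION & SPEC =====
-- the bracket balance of a list of characters, as a closed form on the input:
-- each '(' counts +1, every other character -1
def pvBal (l : List Char) : Int := 2 * (l.count '(' : Int) - l.length

-- On strings whose running balance first goes negative exactly at the last
-- character (e.g. ")", "())"), A returns True because its loop never re-tests
-- the balance after consuming the final character; B returns False, the
-- intended answer for a never-goes-negative check.
-- minimum, over all prefixes of l (including [] and l itself), of the bracket
-- balance of the prefix; a right fold, used only to INSPECT the input shape
def pvMinPref : List Char → Int
  | [] => 0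
  | c :: rest => min 0 (2 * (if c = '(' then (1 : Int) else 0) - 1 + pvMinPref rest)

def D_check (brackets : String) : Prop :=
  0 ≤ pvMinPref brackets.toList.dropLast ∧ pvBal brackets.toList < 0
instance (brackets : String) : Decidable (D_check brackets) := by unfold D_check; infer_instance

def Spec_check (brackets : String) (out : Bool) : Prop := ¬ D_check brackets → out = check_alt brackets
instance (brackets : String) (out : Bool) : Decidable (Spec_check brackets out) := by unfold Spec_check; infer_instance

def pvDiffWitness_check : String := ")"
def pvDiffWitnessOut_check : Bool × Bool := (true, false)

-- ===== CLAIM (what is proved, stated in full; the proofs are below) =====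
def Claim_unchanged_check : Prop := ∀ (brackets : String), Dom_check brackets → Spec_check brackets (check brackets)
def Claim_changed_check : Prop := Dom_check (pvDiffWitness_check) ∧ D_check (pvDiffWitness_check) ∧ check (pvDiffWitness_check) = pvDiffWitnessOut_check.1 ∧ check_alt (pvDiffWitness_check) = pvDiffWitnessOut_check.2 ∧ pvDiffWitnessOut_check.1 ≠ pvDiffWitnessOut_check.2
def Claim_exact_check : Prop := ∀ (brackets : String), Dom_check brackets → D_check brackets → check brackets ≠ check_alt brackets

-- ===== LEMMAS AND PROOFS =====

-- A's loop is true iff the balance before every character (i.e. of every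
-- proper prefix) stays ≥ 0 relative to the start value t.
theorem pvBal_nil : pvBal [] = 0 := by simp [pvBal]

theorem pvBal_cons (c : Char) (l : List Char) :
    pvBal (c :: l) = (if c == '(' then (1 : Int) else -1) + pvBal l := by
  by_cases h : c = '('
  · simp [pvBal, h]; ring
  · simp [pvBal, h]; ring

theorem pvMinPref_iff (l : List Char) (t : Int) :
    (0 ≤ t + pvMinPref l) ↔ ∀ i, i ≤ l.length → 0 ≤ t + pvBal (l.take i) := by
  induction l generalizing t with
  | nil =>
      constructor
      · intro h i hi
        have hi0 : i = 0 := by simpa using hi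
        subst hi0
        simpa [pvBal_nil, pvMinPref] using h
      · intro h
        simpa [pvBal_nil, pvMinPref] using h 0 (by simp)
  | cons c rest ih =>
      have hδ : 2 * (if c = '(' then (1 : Int) else 0) - 1
          = (if c == '(' then (1 : Int) else -1) := by
        by_cases h : c = '(' <;> simp [h]
      constructor
      · intro h i hi
        simp only [pvMinPref, hδ] at h
        set X := (if c == '(' then (1 : Int) else -1) + pvMinPref rest with hX
        have hm1 : min 0 X ≤ 0 := min_le_left _ _
        have hm2 : min 0 X ≤ X := min_le_right _ _
        have h0 : (0 : Int) ≤ t := by linarith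
        have hrec : (0 : Int) ≤ t + X := by linarith
        cases i with
        | zero => simpa [pvBal_nil] using h0
        | succ j =>
            have := (ih (t + (if c == '(' then (1 : Int) else -1))).mp
              (by rw [hX] at hrec; linarith) j (by simpa using hi)
            simpa [pvBal_cons, add_assoc] using this
      · intro h
        have h0 : 0 ≤ t := by simpa [pvBal_nil] using h 0 (by simp)
        have hrest : ∀ i, i ≤ rest.length →
            0 ≤ (t + (if c == '(' then (1 : Int) else -1)) + pvBal (rest.take i) := by
          intro i hi
          have := h (i + 1) (by simpa using hi)
          simpa [pvBal_cons, add_assoc] using this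
        have := (ih (t + (if c == '(' then (1 : Int) else -1))).mpr hrest
        simp only [pvMinPref, hδ]
        have := le_min h0 (by linarith [this] : (0:Int) ≤ t + ((if c == '(' then (1:Int) else -1) + pvMinPref rest))
        calc (0:Int) ≤ min t (t + ((if c == '(' then (1:Int) else -1) + pvMinPref rest)) := this
          _ = t + min 0 ((if c == '(' then (1:Int) else -1) + pvMinPref rest) := by
              rw [← min_add_add_left]; ring_nf
          _ = _ := by ring_nf

theorem D_iff (brackets : String) :
    D_check brackets ↔
      ((∀ i, i < brackets.toList.length → 0 ≤ pvBal (brackets.toList.take i)) ∧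
        pvBal brackets.toList < 0) := by
  unfold D_check
  have hmain : (0 ≤ pvMinPref brackets.toList.dropLast) ↔
      ∀ i, i < brackets.toList.length → 0 ≤ pvBal (brackets.toList.take i) := by
    have := pvMinPref_iff brackets.toList.dropLast 0
    simp only [zero_add] at this
    rw [this]
    cases hl : brackets.toList with
    | nil => simp [pvBal_nil]
    | cons c rest =>
        have hlen : (c :: rest).dropLast.length = rest.length := by simp
        constructor
        · intro h i hi
          have hi' : i ≤ rest.length := by simp at hi; omega
          have := h i (by omega)
          rwa [List.dropLast_eq_take, List.take_take,
            show min i ((c :: rest).length - 1) = i by simp; omega] at this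
        · intro h i hi
          rw [hlen] at hi
          have := h i (by simp; omega)
          rwa [List.dropLast_eq_take, List.take_take,
            show min i ((c :: rest).length - 1) = i by simp; omega]
  rw [hmain]

theorem checkLoop_iff (l : List Char) (t : Int) :
    checkLoop l t = true ↔ ∀ i, i < l.length → 0 ≤ t + pvBal (l.take i) := by
  induction l generalizing t with
  | nil => simp [checkLoop]
  | cons c rest ih =>
      by_cases ht : 0 ≤ t
      · rw [show checkLoop (c :: rest) t
            = checkLoop rest (t + (if c == '(' then (1 : Int) else -1)) by
              simp [checkLoop, ht], ih]
        constructor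
        · intro h i hi
          cases i with
          | zero => simpa [pvBal_nil] using ht
          | succ j =>
              have := h j (by simpa using hi)
              simpa [pvBal_cons, add_assoc] using this
        · intro h i hi
          have := h (i + 1) (by simpa using hi)
          simpa [pvBal_cons, add_assoc] using this
      · constructor
        · intro h; exact absurd h (by simp [checkLoop, ht])
        · intro h
          exact absurd (by simpa [pvBal_nil] using h 0 (by simp)) ht

-- B's loop builds exactly the list of balances of the nonempty prefixes.
theorem foldB_spec (l : List Char) (acc : List Int) (t : Int) :
    (l.foldl
      (fun (st : List Int × Int) c =>
        (st.1 ++ [st.2 + (if c == '(' then (1 : Int) else -1)],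
          st.2 + (if c == '(' then (1 : Int) else -1))) (acc, t)).1
      = acc ++ (List.range l.length).map (fun i => t + pvBal (l.take (i + 1))) := by
  induction l generalizing acc t with
  | nil => simp
  | cons c rest ih =>
      simp only [List.foldl_cons]
      rw [ih]
      simp only [List.length_cons]
      rw [List.range_succ_eq_map, List.map_cons, List.map_map]
      simp only [List.append_assoc, List.singleton_append]
      congr 1
      congr 1
      · simp [pvBal_cons, pvBal_nil]
      · apply List.map_congr_left
        intro i _
        simp [pvBal_cons, Function.comp, add_assoc]

-- min(xs, default=0) ≥ 0 iff every element is ≥ 0.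
theorem min_getD_nonneg_iff (xs : List Int) :
    (0 ≤ (PySem.List.min? xs (fun x => x)).getD 0) ↔ ∀ x ∈ xs, 0 ≤ x := by
  cases hmin : PySem.List.min? xs (fun x => x) with
  | none =>
      rw [PySem.List.min?_eq_none_iff] at hmin
      simp [hmin]
  | some m =>
      simp only [Option.getD_some]
      constructor
      · intro h x hx
        exact le_trans h (PySem.List.min?_isMin hmin x hx)
      · intro h
        exact h m (PySem.List.min?_mem hmin)

-- B is true iff every nonempty-prefix balance is ≥ 0.
theorem check_alt_iff (brackets : String) :
    check_alt brackets = true ↔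
      ∀ i, i < brackets.toList.length → 0 ≤ pvBal (brackets.toList.take (i + 1)) := by
  simp only [check_alt, decide_eq_true_eq]
  rw [foldB_spec, min_getD_nonneg_iff]
  simp [List.mem_range]

-- ===== VERDICT (by name: the statements are the Claim_ definitions above) =====
theorem check_spec : Claim_unchanged_check := by
  intro brackets _ hD
  rw [D_iff] at hD
  by_cases hA : check brackets = true
  · have hp : ∀ i, i < brackets.toList.length → 0 ≤ pvBal (brackets.toList.take i) := by
      intro i hi
      have := (checkLoop_iff brackets.toList 0).mp hA i hi
      simpa using this
    have hlast : 0 ≤ pvBal brackets.toList := by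
      by_contra hneg
      exact hD ⟨hp, by omega⟩
    have hB : check_alt brackets = true := by
      rw [check_alt_iff]
      intro i hi
      rcases Nat.lt_or_ge (i + 1) brackets.toList.length with h | h
      · exact hp (i + 1) h
      · have heq : brackets.toList.take (i + 1) = brackets.toList :=
          List.take_of_length_le (by omega)
        rw [heq]; exact hlast
    rw [hA, hB]
  · have hB : ¬ check_alt brackets = true := by
      rw [check_alt_iff]
      intro hall
      apply hA
      rw [show check brackets = checkLoop brackets.toList 0 from rfl, checkLoop_iff]
      intro i hi
      cases i with
      | zero => simp [pvBal_nil]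
      | succ j =>
          have := hall j (by omega)
          simpa using this
    simp only [Bool.not_eq_true] at hA hB
    rw [hA, hB]

theorem check_changed : Claim_changed_check := by
  unfold Claim_changed_check; decide

theorem check_tight : Claim_exact_check := by
  intro brackets _ hD
  rw [D_iff] at hD
  obtain ⟨hp, hneg⟩ := hD
  have hA : check brackets = true := by
    rw [show check brackets = checkLoop brackets.toList 0 from rfl, checkLoop_iff]
    intro i hi
    simpa using hp i hi
  have hne : brackets.toList.length ≠ 0 := by
    intro h0
    rw [List.length_eq_zero_iff.mp h0] at hneg
    simp [pvBal_nil] at hneg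
  have hB : check_alt brackets = false := by
    rw [Bool.eq_false_iff]
    intro hBt
    have := (check_alt_iff brackets).mp hBt (brackets.toList.length - 1) (by omega)
    rw [show brackets.toList.length - 1 + 1 = brackets.toList.length by omega,
      List.take_length] at this
    omega
  rw [hA, hB]; simp
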